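-- pv_equiv track=rewrite | github.com/KevinBian107/GLearning-Benchmark | graph_data_loader/graph_token_dataset_nativegraph.py | parse_label_from_text
-- ===== SOURCE A (Python) =====
-- from typing import List, Optional, Tuple
--
-- def parse_label_from_text(text: str) -> Optional[int]:
--     """Parse label from tokenized graph text.
--
--     Args:
--         text: Tokenized graph string ending with "<p> yes/no <eos>"
--
--     Returns:
--         Binary label (1 for yes, 0 for no) or None if not found
--     """
--     tokens = text.split()
--     # Look for <p> tag followed by yes/no
--     for i, tok in enumerate(tokens):
--         if tok == '<p>' and i + 1 < len(tokens):
--             label_tok = tokens[i + 1].lower()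
--             if label_tok == 'yes':
--                 return 1
--             elif label_tok == 'no':
--                 return 0
--     return None
-- ===== SOURCE B (Python) =====
-- import re
--
-- # Single regex search over the raw text instead of split()+indexed loop.
-- # (?:^|\s) anchors '<p>' at a token start; the yes/no group is matched
-- # case-insensitively via char classes ('<p>' itself stays case-sensitive,
-- # as in the original); the lookahead (?=\s|$) forces a whole token.
-- _LABEL_RE = re.compile(r'(?:^|\s)<p>\s+([yY][eE][sS]|[nN][oO])(?=\s|$)')
--
-- def parse_label_from_text(text):
--     m = _LABEL_RE.search(text)
--     if m is None:
--         return None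
--     return 1 if m.group(1).lower() == 'yes' else 0
-- ===== Notes on version B (the rewrite author's own statement) =====
-- stated objective: idiomatic
-- what changed: Replaces split()-into-tokens plus an indexed enumerate loop with lookahead tokens[i+1] by a single compiled-regex search over the raw text ((?:^|\s)<p>\s+([yY][eE][sS]|[nN][oO])(?=\s|$)), so no token list is ever built.
import Mathlib
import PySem

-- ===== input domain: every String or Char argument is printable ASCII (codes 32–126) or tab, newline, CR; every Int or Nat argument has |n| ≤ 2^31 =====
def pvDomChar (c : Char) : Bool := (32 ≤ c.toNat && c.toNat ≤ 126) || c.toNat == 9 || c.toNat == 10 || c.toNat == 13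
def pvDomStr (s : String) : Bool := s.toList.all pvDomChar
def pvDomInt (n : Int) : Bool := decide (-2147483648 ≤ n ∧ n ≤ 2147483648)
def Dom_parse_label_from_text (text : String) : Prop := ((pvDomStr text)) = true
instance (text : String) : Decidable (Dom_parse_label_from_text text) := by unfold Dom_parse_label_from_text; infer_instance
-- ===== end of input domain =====

-- B replaces split()+indexed token loop by a single regex-style left-to-right scan of the
-- raw text for the pattern (?:^|\s)<p>\s+([yY][eE][sS]|[nN][oO])(?=\s|$); idiomatic one-liner in Python.


-- ===== PORT A =====
-- the 'for i, tok in enumerate(tokens)' loop; tokens[i+1] is guarded by i+1 < len(tokens),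
-- so the pyGet? none branch is unreachable (it falls through to the next iteration).
def pvALoop (tokens : List String) : List (Int × String) → Option Int
  | [] => none
  | (i, tok) :: rest =>
    if tok = "<p>" ∧ i + 1 < (tokens.length : Int) then
      match PySem.List.pyGet? tokens (i + 1) with
      | some t =>
        let label_tok := PySem.Str.lower t
        if label_tok = "yes" then some 1
        else if label_tok = "no" then some 0
        else pvALoop tokens rest
      | none => pvALoop tokens rest
    else pvALoop tokens rest

def parse_label_from_text (text : String) : Option Int :=
  let tokens := PySem.Str.split₀ text
  pvALoop tokens (PySem.List.enumerate tokens)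

-- ===== PORT B =====
-- Hand port of re.search for the fixed pattern (?:^|\s)<p>\s+([yY][eE][sS]|[nN][oO])(?=\s|$):
-- pvSearch tries each position left to right (exactly re.search's order); the Bool carries the
-- (?:^|\s) alternative as "previous char is start-of-string or whitespace"; pvMatchAt is the
-- literal '<p>', pvMatchTail the \s+ (greedy; no backtracking is needed since y/n are not \s),
-- pvMatchYesNo the alternation with the (?=\s|$) lookahead (pvBoundary). Exact on the ASCII domain.
def pvBoundary : List Char → Bool
  | [] => true
  | c :: _ => PySem.Chars.isspace c

def pvMatchYesNo (cs : List Char) : Option Int :=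
  if PySem.Chars.lower (cs.take 3) = ['y', 'e', 's'] ∧ pvBoundary (cs.drop 3) then some 1
  else if PySem.Chars.lower (cs.take 2) = ['n', 'o'] ∧ pvBoundary (cs.drop 2) then some 0
  else none

def pvMatchTail : List Char → Option Int
  | [] => none
  | c :: rest =>
    if PySem.Chars.isspace c then pvMatchYesNo (rest.dropWhile PySem.Chars.isspace) else none

def pvMatchAt (cs : List Char) : Option Int :=
  if cs.take 3 = ['<', 'p', '>'] then pvMatchTail (cs.drop 3) else none

def pvSearch : List Char → Bool → Option Int
  | [], b => if b then pvMatchAt [] else none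
  | c :: rest, b =>
    match (if b then pvMatchAt (c :: rest) else none) with
    | some v => some v
    | none => pvSearch rest (PySem.Chars.isspace c)

def parse_label_from_text_alt (text : String) : Option Int :=
  pvSearch text.toList true

-- ===== PRECONDITION & SPEC =====
def Spec_parse_label_from_text (text : String) (out : Option Int) : Prop := out = parse_label_from_text_alt text
instance (text : String) (out : Option Int) : Decidable (Spec_parse_label_from_text text out) := by unfold Spec_parse_label_from_text; infer_instance

-- ===== CLAIM (what is proved, stated in full; the proofs are below) =====
def Claim_equal_parse_label_from_text : Prop := ∀ (text : String), Dom_parse_label_from_text text → Spec_parse_label_from_text text (parse_label_from_text text)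

-- ===== LEMMAS AND PROOFS =====

def pvNonws (c : Char) : Bool := !PySem.Chars.isspace c

-- word decomposition of a char list, as str.split() produces it
def pvWords : (cs : List Char) → List (List Char)
  | [] => []
  | c :: rest =>
    if PySem.Chars.isspace c then pvWords rest
    else (c :: rest.takeWhile pvNonws) :: pvWords (rest.dropWhile pvNonws)
termination_by cs => cs.length
decreasing_by
  · simp
  · have := List.length_dropWhile_le pvNonws rest; simp; omega

-- A's scan expressed structurally on the token list
def pvTokScan : List (List Char) → Option Int
  | [] => none
  | [_] => none
  | t :: u :: rest =>
    if t = ['<', 'p', '>'] then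
      if PySem.Chars.lower u = ['y', 'e', 's'] then some 1
      else if PySem.Chars.lower u = ['n', 'o'] then some 0
      else pvTokScan (u :: rest)
    else pvTokScan (u :: rest)

def pvTokScanStr : List String → Option Int
  | [] => none
  | [_] => none
  | t :: u :: rest =>
    if t = "<p>" then
      if PySem.Str.lower u = "yes" then some 1
      else if PySem.Str.lower u = "no" then some 0
      else pvTokScanStr (u :: rest)
    else pvTokScanStr (u :: rest)

def pvFirstLabel : List (List Char) → Option Int
  | [] => none
  | u :: _ =>
    if PySem.Chars.lower u = ['y', 'e', 's'] then some 1
    else if PySem.Chars.lower u = ['n', 'o'] then some 0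
    else none

theorem pvWords_nil : pvWords [] = [] := by rw [pvWords.eq_def]

theorem pvWords_cons (c : Char) (rest : List Char) :
    pvWords (c :: rest) =
      if PySem.Chars.isspace c then pvWords rest
      else (c :: rest.takeWhile pvNonws) :: pvWords (rest.dropWhile pvNonws) := by
  rw [pvWords.eq_def]

theorem pv_go_spec (cs : List Char) : ∀ (cur : List Char) (acc : List (List Char)),
    PySem.Chars.split₀.go cs cur acc =
      acc.reverse ++ (if cur.isEmpty then pvWords cs
        else (cur.reverse ++ cs.takeWhile pvNonws) :: pvWords (cs.dropWhile pvNonws)) := by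
  induction cs with
  | nil =>
    intro cur acc
    rw [PySem.Chars.split₀.go.eq_def]
    cases cur <;> simp [pvWords]
  | cons c rest ih =>
    intro cur acc
    rw [PySem.Chars.split₀.go.eq_def]
    by_cases hc : PySem.Chars.isspace c
    · have hnw : pvNonws c = false := by simp [pvNonws, hc]
      cases cur with
      | nil =>
        simp only [hc, if_true, List.isEmpty_nil]
        rw [ih, pvWords_cons]
        simp [hc]
      | cons x xs =>
        simp only [hc, if_true, List.isEmpty_cons, ite_false, Bool.false_eq_true]
        rw [ih]
        simp [List.takeWhile_cons, List.dropWhile_cons, hnw, pvWords_cons, hc]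
    · have hnw : pvNonws c = true := by simp [pvNonws, hc]
      simp only [hc, ite_false, Bool.false_eq_true]
      rw [ih]
      cases cur <;>
        simp [pvWords_cons, hc, hnw, List.takeWhile_cons, List.dropWhile_cons]

theorem pv_split_eq_words (cs : List Char) : PySem.Chars.split₀ cs = pvWords cs := by
  unfold PySem.Chars.split₀
  rw [pv_go_spec]
  simp

theorem pv_enumerate_cons {α : Type} (x : α) (t : List α) (s : Int) :
    PySem.List.enumerate (x :: t) s = (s, x) :: PySem.List.enumerate t (s + 1) := rfl

theorem pv_aLoop_eq (suf pre : List String) :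
    pvALoop (pre ++ suf) (PySem.List.enumerate suf (pre.length : Int)) = pvTokScanStr suf := by
  induction suf generalizing pre with
  | nil => simp [pvALoop, PySem.List.enumerate, pvTokScanStr]
  | cons t rest ih =>
    rw [pv_enumerate_cons, pvALoop]
    have hget : PySem.List.pyGet? (pre ++ t :: rest) ((pre.length : Int) + 1) = rest.head? := by
      have h0 : ((pre.length : Int) + 1) = ((pre.length + 1 : Nat) : Int) := by push_cast; ring
      rw [h0, PySem.List.pyGet?_natCast]
      rw [List.getElem?_append_right (by omega)]
      simp [List.head?_eq_getElem?]
    have hih : pvALoop (pre ++ t :: rest) (PySem.List.enumerate rest ((pre.length : Int) + 1)) =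
        pvTokScanStr rest := by
      have h2 : pre ++ t :: rest = (pre ++ [t]) ++ rest := by simp
      have h3 : ((pre.length : Int) + 1) = (((pre ++ [t]).length : Nat) : Int) := by
        simp
      rw [h2, h3, ih]
    cases rest with
    | nil =>
      have hguard : ¬ (t = "<p>" ∧ (pre.length : Int) + 1 < ((pre ++ [t]).length : Int)) := by
        simp
      rw [if_neg hguard, hih]
      simp [pvTokScanStr]
    | cons u rest' =>
      by_cases hp : t = "<p>"
      · have hguard : t = "<p>" ∧ (pre.length : Int) + 1 < ((pre ++ t :: u :: rest').length : Int) := by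
          refine ⟨hp, ?_⟩
          simp
        rw [if_pos hguard, hget]
        simp only [List.head?_cons]
        rw [pvTokScanStr, if_pos hp]
        by_cases h1 : PySem.Str.lower u = "yes"
        · simp [h1]
        · by_cases h2 : PySem.Str.lower u = "no"
          · simp [h1, h2]
          · rw [pv_enumerate_cons] at hih
            simp only [h1, h2, if_false, ite_false]
            simpa [h1, h2] using hih
      · have hguard : ¬ (t = "<p>" ∧ (pre.length : Int) + 1 < ((pre ++ t :: u :: rest').length : Int)) := by
          intro h; exact hp h.1
        rw [if_neg hguard, hih, pvTokScanStr, if_neg hp]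

theorem pv_tokScanStr_eq (ts : List String) :
    pvTokScanStr ts = pvTokScan (ts.map String.toList) := by
  have hpat : "<p>".toList = ['<', 'p', '>'] := rfl
  induction ts using pvTokScanStr.induct with
  | case1 => rfl
  | case2 => rfl
  | case3 u rest h1 =>
    have h1' : PySem.Chars.lower u.toList = ['y', 'e', 's'] := by
      rw [← PySem.Str.toList_lower, h1]; rfl
    rw [pvTokScanStr]
    simp only [List.map_cons]
    rw [pvTokScan]
    simp [hpat, h1, h1']
  | case4 u rest h1 h2 =>
    have h1' : PySem.Chars.lower u.toList ≠ ['y', 'e', 's'] := by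
      rw [← PySem.Str.toList_lower]
      intro hcon
      exact h1 (String.ext_iff.mpr (by rw [hcon]; rfl))
    have h2' : PySem.Chars.lower u.toList = ['n', 'o'] := by
      rw [← PySem.Str.toList_lower, h2]; rfl
    rw [pvTokScanStr]
    simp only [List.map_cons]
    rw [pvTokScan]
    simp [hpat, h1, h2, h1', h2']
  | case5 u rest h1 h2 ih =>
    have h1' : PySem.Chars.lower u.toList ≠ ['y', 'e', 's'] := by
      rw [← PySem.Str.toList_lower]
      intro hcon
      exact h1 (String.ext_iff.mpr (by rw [hcon]; rfl))
    have h2' : PySem.Chars.lower u.toList ≠ ['n', 'o'] := by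
      rw [← PySem.Str.toList_lower]
      intro hcon
      exact h2 (String.ext_iff.mpr (by rw [hcon]; rfl))
    rw [pvTokScanStr]
    simp only [List.map_cons]
    rw [pvTokScan]
    simp only [hpat, h1, h2, h1', h2', if_true, if_false, ite_false, ite_true,
      eq_self_iff_true]
    simpa using ih
  | case6 t u rest hp ih =>
    have hp' : t.toList ≠ ['<', 'p', '>'] := by
      intro hcon
      exact hp (String.ext_iff.mpr (by rw [hcon]; rfl))
    rw [pvTokScanStr, if_neg hp]
    simp only [List.map_cons]
    rw [pvTokScan, if_neg hp']
    simpa using ih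

theorem pv_lowerChar_ws {c : Char} (h : PySem.Chars.isspace c = true) :
    PySem.Chars.lowerChar c = c := by
  unfold PySem.Chars.lowerChar
  rw [if_neg]
  unfold PySem.Chars.isupper
  unfold PySem.Chars.isspace at h
  simp only [Bool.and_eq_true, decide_eq_true_eq, Char.le_def, UInt32.le_iff_toNat_le,
    Bool.or_eq_true, not_and, not_le] at *
  have hv : c.toNat = c.val.toNat := rfl
  have hA : ('A'.val.toNat) = 65 := rfl
  have hZ : ('Z'.val.toNat) = 90 := rfl
  intro h1
  rw [hZ]; rw [hA] at h1
  omega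

theorem pv_matchAt_ws {c : Char} (cs : List Char) (hc : PySem.Chars.isspace c = true) :
    pvMatchAt (c :: cs) = none := by
  unfold pvMatchAt
  rw [if_neg]
  intro h
  rw [List.take_succ_cons] at h
  have : c = '<' := (List.cons.injEq _ _ _ _ ▸ h).1
  subst this
  exact absurd hc (by decide)

theorem pv_matchYesNo_token (u b : List Char) (hall : ∀ x ∈ u, PySem.Chars.isspace x = false)
    (hb : ∀ d ds, b = d :: ds → PySem.Chars.isspace d = true) :
    pvMatchYesNo (u ++ b) =
      (if PySem.Chars.lower u = ['y', 'e', 's'] then some 1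
       else if PySem.Chars.lower u = ['n', 'o'] then some 0 else none) := by
  have hlc : ∀ d ds, b = d :: ds → PySem.Chars.lowerChar d = d := by
    intro d ds h; exact pv_lowerChar_ws (hb d ds h)
  match u, hall with
  | [], _ =>
    rcases b with _ | ⟨d, ds⟩
    · decide
    · have hd := hb d ds rfl
      have hld := hlc d ds rfl
      have hc1 : ¬(PySem.Chars.lower (([] ++ d :: ds).take 3) = ['y', 'e', 's'] ∧
          pvBoundary (([] ++ d :: ds).drop 3) = true) := by
        rintro ⟨h1, -⟩
        simp only [List.nil_append, List.take_succ_cons, PySem.Chars.lower, List.map_cons,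
          List.cons.injEq] at h1
        rw [hld] at h1
        exact absurd hd (by rw [h1.1]; decide)
      have hc2 : ¬(PySem.Chars.lower (([] ++ d :: ds).take 2) = ['n', 'o'] ∧
          pvBoundary (([] ++ d :: ds).drop 2) = true) := by
        rintro ⟨h1, -⟩
        simp only [List.nil_append, List.take_succ_cons, PySem.Chars.lower, List.map_cons,
          List.cons.injEq] at h1
        rw [hld] at h1
        exact absurd hd (by rw [h1.1]; decide)
      unfold pvMatchYesNo
      rw [if_neg hc1, if_neg hc2]
      simp [PySem.Chars.lower]
  | [a], hall =>
    rcases b with _ | ⟨d, ds⟩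
    · have hc1 : ¬(PySem.Chars.lower (([a] ++ ([] : List Char)).take 3) = ['y', 'e', 's'] ∧
          pvBoundary (([a] ++ ([] : List Char)).drop 3) = true) := by
        rintro ⟨h1, -⟩
        have := congrArg List.length h1
        simp [PySem.Chars.lower] at this
      have hc2 : ¬(PySem.Chars.lower (([a] ++ ([] : List Char)).take 2) = ['n', 'o'] ∧
          pvBoundary (([a] ++ ([] : List Char)).drop 2) = true) := by
        rintro ⟨h1, -⟩
        have := congrArg List.length h1
        simp [PySem.Chars.lower] at this
      unfold pvMatchYesNo
      rw [if_neg hc1, if_neg hc2]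
      have e1 : ¬ PySem.Chars.lower [a] = ['y', 'e', 's'] := by
        intro h; have := congrArg List.length h; simp [PySem.Chars.lower] at this
      have e2 : ¬ PySem.Chars.lower [a] = ['n', 'o'] := by
        intro h; have := congrArg List.length h; simp [PySem.Chars.lower] at this
      rw [if_neg e1, if_neg e2]
    · have hd := hb d ds rfl
      have hld := hlc d ds rfl
      have hc1 : ¬(PySem.Chars.lower (([a] ++ d :: ds).take 3) = ['y', 'e', 's'] ∧
          pvBoundary (([a] ++ d :: ds).drop 3) = true) := by
        rintro ⟨h1, -⟩
        simp only [List.cons_append, List.nil_append, List.take_succ_cons, PySem.Chars.lower,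
          List.map_cons, List.cons.injEq] at h1
        have h2 : PySem.Chars.lowerChar d = 'e' := by tauto
        rw [hld] at h2
        exact absurd hd (by rw [h2]; decide)
      have hc2 : ¬(PySem.Chars.lower (([a] ++ d :: ds).take 2) = ['n', 'o'] ∧
          pvBoundary (([a] ++ d :: ds).drop 2) = true) := by
        rintro ⟨h1, -⟩
        simp only [List.cons_append, List.nil_append, List.take_succ_cons, List.take_zero,
          PySem.Chars.lower, List.map_cons, List.cons.injEq] at h1
        have h2 : PySem.Chars.lowerChar d = 'o' := by tauto
        rw [hld] at h2
        exact absurd hd (by rw [h2]; decide)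
      unfold pvMatchYesNo
      rw [if_neg hc1, if_neg hc2]
      have e1 : ¬ PySem.Chars.lower [a] = ['y', 'e', 's'] := by
        intro h; have := congrArg List.length h; simp [PySem.Chars.lower] at this
      have e2 : ¬ PySem.Chars.lower [a] = ['n', 'o'] := by
        intro h; have := congrArg List.length h; simp [PySem.Chars.lower] at this
      rw [if_neg e1, if_neg e2]
  | [a, a2], hall =>
    have e1 : ¬ PySem.Chars.lower [a, a2] = ['y', 'e', 's'] := by
      intro h; have := congrArg List.length h; simp [PySem.Chars.lower] at this
    have hc1 : ¬(PySem.Chars.lower (([a, a2] ++ b).take 3) = ['y', 'e', 's'] ∧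
        pvBoundary (([a, a2] ++ b).drop 3) = true) := by
      rintro ⟨h1, -⟩
      rcases b with _ | ⟨d, ds⟩
      · simp only [List.append_nil] at h1
        have := congrArg List.length h1
        simp [PySem.Chars.lower] at this
      · have hld := hlc d ds rfl
        simp only [List.cons_append, List.nil_append, List.take_succ_cons, List.take_zero,
          PySem.Chars.lower, List.map_cons, List.cons.injEq, and_true] at h1
        have h2 : PySem.Chars.lowerChar d = 's' := by tauto
        rw [hld] at h2
        exact absurd (hb d ds rfl) (by rw [h2]; decide)
    have h2t : ([a, a2] ++ b).take 2 = [a, a2] := by simp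
    have h2d : ([a, a2] ++ b).drop 2 = b := by simp
    have hbb : pvBoundary b = true := by
      rcases b with _ | ⟨d, ds⟩
      · rfl
      · simpa [pvBoundary] using hb d ds rfl
    unfold pvMatchYesNo
    rw [if_neg hc1, h2t, h2d, if_neg e1]
    by_cases hno : PySem.Chars.lower [a, a2] = ['n', 'o']
    · rw [if_pos ⟨hno, hbb⟩, if_pos hno]
    · rw [if_neg (fun h => hno h.1), if_neg hno]
  | [a, a2, a3], hall =>
    have ha3 : PySem.Chars.isspace a3 = false := hall a3 (by simp)
    have e2 : ¬ PySem.Chars.lower [a, a2, a3] = ['n', 'o'] := by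
      intro h; have := congrArg List.length h; simp [PySem.Chars.lower] at this
    have h3t : ([a, a2, a3] ++ b).take 3 = [a, a2, a3] := by simp
    have h3d : ([a, a2, a3] ++ b).drop 3 = b := by simp
    have hbb : pvBoundary b = true := by
      rcases b with _ | ⟨d, ds⟩
      · rfl
      · simpa [pvBoundary] using hb d ds rfl
    have hc2 : ¬(PySem.Chars.lower (([a, a2, a3] ++ b).take 2) = ['n', 'o'] ∧
        pvBoundary (([a, a2, a3] ++ b).drop 2) = true) := by
      rintro ⟨-, h2⟩
      simp only [List.cons_append, List.drop_succ_cons, List.drop_zero] at h2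
      simp [pvBoundary, ha3] at h2
    unfold pvMatchYesNo
    rw [h3t, h3d, if_neg hc2, if_neg e2]
    by_cases hy : PySem.Chars.lower [a, a2, a3] = ['y', 'e', 's']
    · rw [if_pos ⟨hy, hbb⟩, if_pos hy]
    · rw [if_neg (fun h => hy h.1), if_neg hy]
  | a :: a2 :: a3 :: a4 :: tl, hall =>
    have ha3 : PySem.Chars.isspace a3 = false := hall a3 (by simp)
    have ha4 : PySem.Chars.isspace a4 = false := hall a4 (by simp)
    have e1 : ¬ PySem.Chars.lower (a :: a2 :: a3 :: a4 :: tl) = ['y', 'e', 's'] := by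
      intro h; have := congrArg List.length h; simp [PySem.Chars.lower] at this
    have e2 : ¬ PySem.Chars.lower (a :: a2 :: a3 :: a4 :: tl) = ['n', 'o'] := by
      intro h; have := congrArg List.length h; simp [PySem.Chars.lower] at this
    have hc1 : ¬(PySem.Chars.lower (((a :: a2 :: a3 :: a4 :: tl) ++ b).take 3) = ['y', 'e', 's'] ∧
        pvBoundary (((a :: a2 :: a3 :: a4 :: tl) ++ b).drop 3) = true) := by
      rintro ⟨-, h2⟩
      simp only [List.cons_append, List.drop_succ_cons, List.drop_zero] at h2
      simp [pvBoundary, ha4] at h2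
    have hc2 : ¬(PySem.Chars.lower (((a :: a2 :: a3 :: a4 :: tl) ++ b).take 2) = ['n', 'o'] ∧
        pvBoundary (((a :: a2 :: a3 :: a4 :: tl) ++ b).drop 2) = true) := by
      rintro ⟨-, h2⟩
      simp only [List.cons_append, List.drop_succ_cons, List.drop_zero] at h2
      simp [pvBoundary, ha3] at h2
    unfold pvMatchYesNo
    rw [if_neg hc1, if_neg hc2, if_neg e1, if_neg e2]

theorem pv_search_false_skip (tw rest' : List Char)
    (h : ∀ x ∈ tw, PySem.Chars.isspace x = false) :
    pvSearch (tw ++ rest') false = pvSearch rest' false := by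
  induction tw with
  | nil => rfl
  | cons x xs ih =>
    rw [List.cons_append, pvSearch]
    simp only [Bool.false_eq_true, if_false, ite_false]
    rw [h x (by simp)]
    exact ih (fun y hy => h y (by simp [hy]))

theorem pv_words_dropWhile_ws (l : List Char) :
    pvWords (l.dropWhile PySem.Chars.isspace) = pvWords l := by
  induction l with
  | nil => rfl
  | cons c rest ih =>
    rw [List.dropWhile_cons]
    by_cases hc : PySem.Chars.isspace c
    · rw [if_pos hc, ih, pvWords_cons, if_pos hc]
    · rw [if_neg hc]

theorem pvFirstLabel_cons (u : List Char) (tl : List (List Char)) :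
    pvFirstLabel (u :: tl) =
      (if PySem.Chars.lower u = ['y', 'e', 's'] then some 1
       else if PySem.Chars.lower u = ['n', 'o'] then some 0 else none) := rfl

theorem pv_head_dropWhile {p : Char → Bool} {l : List Char} {d : Char} {ds : List Char}
    (h : l.dropWhile p = d :: ds) : p d = false := by
  have hne : l.dropWhile p ≠ [] := by rw [h]; simp
  have hx := List.head_dropWhile_not p hne
  have hd : (l.dropWhile p).head hne = d := by simp [h]
  rwa [hd] at hx

theorem pv_matchTail_first (rest' : List Char)
    (hh : ∀ d ds, rest' = d :: ds → PySem.Chars.isspace d = true) :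
    pvMatchTail rest' = pvFirstLabel (pvWords rest') := by
  rcases rest' with _ | ⟨d, ds⟩
  · rw [pvWords_nil]; rfl
  · have hd := hh d ds rfl
    rw [pvMatchTail, if_pos hd]
    have hwords : pvWords (d :: ds) = pvWords (ds.dropWhile PySem.Chars.isspace) := by
      rw [← pv_words_dropWhile_ws (d :: ds), List.dropWhile_cons, if_pos hd]
    rw [hwords]
    rcases hes : ds.dropWhile PySem.Chars.isspace with _ | ⟨e, es'⟩
    · rw [pvWords_nil]; rfl
    · have he : PySem.Chars.isspace e = false := pv_head_dropWhile hes
    -- decompose e :: es' into its first word and the remainder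
      have hsplit : e :: es' = (e :: es'.takeWhile pvNonws) ++ es'.dropWhile pvNonws := by
        simpa using (List.takeWhile_append_dropWhile (p := pvNonws) (l := es')).symm
      conv_lhs => rw [hsplit]
      rw [pv_matchYesNo_token]
      · rw [pvWords_cons, if_neg (show ¬ PySem.Chars.isspace e = true by simp [he])]
        rfl
      · intro x hx
        rcases List.mem_cons.mp hx with hx | hx
        · subst hx; exact he
        · have := List.mem_takeWhile_imp hx
          simpa [pvNonws] using this
      · intro d' ds' hd'
        have h0 : pvNonws d' = false := pv_head_dropWhile hd'
        simpa [pvNonws] using h0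

theorem pv_matchAt_token (c : Char) (rest : List Char) (hc : PySem.Chars.isspace c = false) :
    pvMatchAt (c :: rest) =
      (if c :: rest.takeWhile pvNonws = ['<', 'p', '>'] then
        pvFirstLabel (pvWords (rest.dropWhile pvNonws))
       else none) := by
  by_cases hp : c :: rest.takeWhile pvNonws = ['<', 'p', '>']
  · rw [if_pos hp]
    have hceq : c = '<' := by
      have := congrArg List.head? hp; simpa using this
    have htw : rest.takeWhile pvNonws = ['p', '>'] := by
      have := congrArg List.tail hp; simpa using this
    have hsplit : rest = ['p', '>'] ++ rest.dropWhile pvNonws := by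
      conv_lhs => rw [← List.takeWhile_append_dropWhile (p := pvNonws) (l := rest)]
      rw [htw]
    subst hceq
    rw [show ('<' :: rest) = '<' :: rest from rfl]
    conv_lhs => rw [hsplit]
    rw [pvMatchAt]
    rw [if_pos (by simp)]
    have hdrop : ('<' :: (['p', '>'] ++ rest.dropWhile pvNonws)).drop 3 =
        rest.dropWhile pvNonws := by simp
    rw [hdrop]
    apply pv_matchTail_first
    intro d ds hd'
    have h0 : pvNonws d = false := pv_head_dropWhile hd'
    simpa [pvNonws] using h0
  · rw [if_neg hp]
    rw [pvMatchAt]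
    by_cases h3 : (c :: rest).take 3 = ['<', 'p', '>']
    · rw [if_pos h3]
      rw [List.take_succ_cons] at h3
      have hceq : c = '<' := by
        have := congrArg List.head? h3; simpa using this
      have ht2 : rest.take 2 = ['p', '>'] := by
        have := congrArg List.tail h3; simpa using this
      rcases rest with _ | ⟨r1, rest1⟩
      · simp at ht2
      rcases rest1 with _ | ⟨r2, rest2⟩
      · simp at ht2
      have hr1 : r1 = 'p' := by
        have := congrArg List.head? ht2; simpa using this
      have hr2 : r2 = '>' := by
        have := congrArg List.head? (congrArg List.tail ht2); simpa using this
      subst hceq; subst hr1; subst hr2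
      rcases rest2 with _ | ⟨g, gs⟩
      · exact absurd (by simp [List.takeWhile_cons]; decide) hp
      · have hg : pvNonws g = true := by
          by_cases h : pvNonws g
          · exact h
          · exfalso
            apply hp
            simp only [List.takeWhile_cons]
            norm_num [h]
            decide
        have hgs : PySem.Chars.isspace g = false := by simpa [pvNonws] using hg
        rw [show (('<' :: 'p' :: '>' :: g :: gs).drop 3) = g :: gs from rfl]
        rw [pvMatchTail, if_neg (by rw [hgs]; simp)]
    · rw [if_neg h3]

theorem pv_search_eq_tokScan (cs : List Char) : pvSearch cs true = pvTokScan (pvWords cs) := by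
  suffices H : ∀ (n : Nat) (l : List Char), l.length ≤ n → pvSearch l true = pvTokScan (pvWords l) by
    exact H cs.length cs le_rfl
  intro n
  induction n with
  | zero =>
    intro l hl
    have : l = [] := List.eq_nil_of_length_eq_zero (by omega)
    subst this
    rw [pvWords_nil]
    rfl
  | succ n ih =>
    intro l hl
    rcases l with _ | ⟨c, rest⟩
    · rw [pvWords_nil]; rfl
    by_cases hc : PySem.Chars.isspace c
    · rw [pvSearch, pv_matchAt_ws rest hc]
      simp only [if_true]
      rw [hc]
      have := ih rest (by simpa using Nat.lt_succ_iff.mp (by simpa using hl))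
      rw [this, pvWords_cons, if_pos hc]
    · have hc' : PySem.Chars.isspace c = false := by simpa using hc
      have hM := pv_matchAt_token c rest hc'
      have hwords : pvWords (c :: rest) =
          (c :: rest.takeWhile pvNonws) :: pvWords (rest.dropWhile pvNonws) := by
        rw [pvWords_cons, if_neg (by rw [hc']; simp)]
      have hrest : rest = rest.takeWhile pvNonws ++ rest.dropWhile pvNonws :=
        (List.takeWhile_append_dropWhile (p := pvNonws) (l := rest)).symm
      have hskip : pvSearch rest false = pvSearch (rest.dropWhile pvNonws) false := by
        conv_lhs => rw [hrest]
        apply pv_search_false_skip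
        intro x hx
        simpa [pvNonws] using List.mem_takeWhile_imp hx
      have hlen : (rest.dropWhile pvNonws).length ≤ rest.length :=
        List.length_dropWhile_le _ _
      have hrlen : rest.length ≤ n := by simpa using Nat.lt_succ_iff.mp (by simpa using hl)
      have htail : pvSearch (rest.dropWhile pvNonws) false =
          pvTokScan (pvWords (rest.dropWhile pvNonws)) := by
        rcases hr : rest.dropWhile pvNonws with _ | ⟨d, ds⟩
        · rw [pvWords_nil]; rfl
        · have hd : PySem.Chars.isspace d = true := by
            have h0 : pvNonws d = false := pv_head_dropWhile hr
            simpa [pvNonws] using h0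
          rw [pvSearch]
          simp only [Bool.false_eq_true, if_false]
          rw [hd]
          have hds : ds.length ≤ n := by
            have : (d :: ds).length ≤ rest.length := by rw [← hr]; exact hlen
            simp at this; omega
          rw [ih ds hds, pvWords_cons, if_pos hd]
      rw [pvSearch]
      simp only [if_true]
      rw [hwords]
      rcases hv : pvMatchAt (c :: rest) with _ | v <;> rw [hv] at hM
      · -- no match at this token: both sides skip to the next token
        show pvSearch rest (PySem.Chars.isspace c) =
          pvTokScan ((c :: rest.takeWhile pvNonws) :: pvWords (rest.dropWhile pvNonws))
        rw [hc', hskip, htail]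
        by_cases hp : c :: rest.takeWhile pvNonws = ['<', 'p', '>']
        · rw [if_pos hp] at hM
          rcases hw : pvWords (rest.dropWhile pvNonws) with _ | ⟨u, tl⟩
          · rfl
          · rw [hw] at hM
            rw [pvFirstLabel_cons] at hM
            conv_rhs => rw [pvTokScan]
            rw [if_pos hp]
            by_cases h1 : PySem.Chars.lower u = ['y', 'e', 's']
            · rw [if_pos h1] at hM; exact absurd hM (by simp)
            · rw [if_neg h1] at hM
              by_cases h2 : PySem.Chars.lower u = ['n', 'o']
              · rw [if_pos h2] at hM; exact absurd hM (by simp)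
              · rw [if_neg h1, if_neg h2]
        · rcases hw : pvWords (rest.dropWhile pvNonws) with _ | ⟨u, tl⟩
          · rfl
          · conv_rhs => rw [pvTokScan]
            rw [if_neg hp]
      · -- a match at this token: it is the label of this token pair
        show some v =
          pvTokScan ((c :: rest.takeWhile pvNonws) :: pvWords (rest.dropWhile pvNonws))
        by_cases hp : c :: rest.takeWhile pvNonws = ['<', 'p', '>']
        · rw [if_pos hp] at hM
          rcases hw : pvWords (rest.dropWhile pvNonws) with _ | ⟨u, tl⟩
          · rw [hw] at hM
            exact absurd hM (by simp [pvFirstLabel])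
          · rw [hw] at hM
            rw [pvFirstLabel_cons] at hM
            conv_rhs => rw [pvTokScan]
            rw [if_pos hp]
            by_cases h1 : PySem.Chars.lower u = ['y', 'e', 's']
            · rw [if_pos h1] at hM
              rw [if_pos h1]
              exact hM
            · rw [if_neg h1] at hM
              by_cases h2 : PySem.Chars.lower u = ['n', 'o']
              · rw [if_pos h2] at hM
                rw [if_neg h1, if_pos h2]
                exact hM
              · rw [if_neg h2] at hM; exact absurd hM (by simp)
        · rw [if_neg hp] at hM; exact absurd hM (by simp)

-- ===== VERDICT (by name: the statement is the Claim_ definition above) =====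
theorem parse_label_from_text_spec : Claim_equal_parse_label_from_text := by
  intro text _
  unfold Spec_parse_label_from_text parse_label_from_text parse_label_from_text_alt
  have hA := pv_aLoop_eq (PySem.Str.split₀ text) []
  simp at hA
  rw [hA, pv_tokScanStr_eq, PySem.Str.split₀_map_toList, pv_split_eq_words,
    pv_search_eq_tokScan]
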